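-- pv_equiv track=rewrite | github.com/joeblack2k/sentinel-yt | app/services/judge.py | _is_fatal_auth_or_quota
-- ===== SOURCE A (Python) =====
-- def _is_fatal_auth_or_quota(msg: str) -> bool:
--     check = msg.lower()
--     needles = [
--         "401",
--         "403",
--         "429",
--         "quota",
--         "api key",
--         "permission",
--         "invalid argument",
--         "unauthenticated",
--         "api_key_invalid",
--         "billing",
--     ]
--     return any(n in check for n in needles)
-- ===== SOURCE B (Python) =====
-- def _is_fatal_auth_or_quota(msg: str) -> bool:
--     # One left-to-right pass over the lowercased string: at each position,
--     # test whether some needle starts there (instead of ten independent scans).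
--     low = msg.lower()
--     needles = (
--         "401",
--         "403",
--         "429",
--         "quota",
--         "api key",
--         "permission",
--         "invalid argument",
--         "unauthenticated",
--         "api_key_invalid",
--         "billing",
--     )
--     for i in range(len(low)):
--         for n in needles:
--             if low.startswith(n, i):
--                 return True
--     return False
-- ===== Notes on version B (the rewrite author's own statement) =====
-- stated objective: alternative
-- what changed: Replaced ten independent substring-membership scans (one per needle over the whole string) with a single left-to-right pass over the lowercased string that tests at each position whether any needle starts there.
import Mathlib
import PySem

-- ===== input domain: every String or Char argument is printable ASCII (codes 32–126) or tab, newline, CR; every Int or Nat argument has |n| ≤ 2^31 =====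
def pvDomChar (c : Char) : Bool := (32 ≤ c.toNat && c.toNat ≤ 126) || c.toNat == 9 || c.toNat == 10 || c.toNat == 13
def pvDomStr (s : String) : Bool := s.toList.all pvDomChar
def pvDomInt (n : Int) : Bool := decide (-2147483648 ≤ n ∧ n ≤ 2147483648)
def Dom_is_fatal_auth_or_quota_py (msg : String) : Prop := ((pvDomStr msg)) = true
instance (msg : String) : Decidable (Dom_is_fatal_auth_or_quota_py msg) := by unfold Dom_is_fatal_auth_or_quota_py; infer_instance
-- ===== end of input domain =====

-- B replaces ten independent substring scans with one left-to-right positional pass ('alternative', same cost).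

-- the shared needle list (identical literal in both Pythons)
def pvNeedles : List String :=
  ["401", "403", "429", "quota", "api key", "permission",
   "invalid argument", "unauthenticated", "api_key_invalid", "billing"]

-- ===== PORT A =====
-- check = msg.lower(); return any(n in check for n in needles)
def is_fatal_auth_or_quota_py (msg : String) : Bool :=
  let check := PySem.Str.lower msg
  pvNeedles.any (fun n => PySem.Str.isIn n check)

-- ===== PORT B =====
-- for i in range(len(low)): for n in needles: if low.startswith(n, i): return True
-- (scan over successive suffixes = successive start positions i)
def pvScanB : List Char → Bool
  | [] => false
  | c :: rest =>
      if pvNeedles.any (fun n => PySem.Chars.startswith (c :: rest) n.toList) then true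
      else pvScanB rest

def is_fatal_auth_or_quota_py_alt (msg : String) : Bool :=
  pvScanB (PySem.Chars.lower msg.toList)

-- ===== PRECONDITION & SPEC =====
def Spec_is_fatal_auth_or_quota_py (msg : String) (out : Bool) : Prop := out = is_fatal_auth_or_quota_py_alt msg
instance (msg : String) (out : Bool) : Decidable (Spec_is_fatal_auth_or_quota_py msg out) := by unfold Spec_is_fatal_auth_or_quota_py; infer_instance

-- ===== CLAIM (what is proved, stated in full; the proofs are below) =====
def Claim_equal_is_fatal_auth_or_quota_py : Prop := ∀ (msg : String), Dom_is_fatal_auth_or_quota_py msg → Spec_is_fatal_auth_or_quota_py msg (is_fatal_auth_or_quota_py msg)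

-- ===== LEMMAS AND PROOFS =====

-- B's positional scan fires iff some needle is a prefix of some suffix
lemma pvScanB_iff (L : List Char) :
    pvScanB L = true ↔ ∃ n ∈ pvNeedles, ∃ j, n.toList <+: L.drop j := by
  induction L with
  | nil =>
      simp only [pvScanB, List.drop_nil]
      constructor
      · intro h; exact absurd h (by decide)
      · rintro ⟨n, hn, j, hp⟩
        have : n.toList = [] := List.prefix_nil.mp hp
        fin_cases hn <;> simp_all
  | cons c rest ih =>
      unfold pvScanB
      split_ifs with h
      · simp only [true_iff]
        rcases List.any_eq_true.mp h with ⟨n, hn, hs⟩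
        exact ⟨n, hn, 0, (PySem.Chars.startswith_iff _ _).mp hs⟩
      · simp only [ih] at *
        constructor
        · rintro ⟨n, hn, j, hp⟩
          exact ⟨n, hn, j + 1, by simpa using hp⟩
        · rintro ⟨n, hn, j, hp⟩
          cases j with
          | zero =>
              exact absurd (List.any_eq_true.mpr
                ⟨n, hn, (PySem.Chars.startswith_iff _ _).mpr (by simpa using hp)⟩) h
          | succ j' => exact ⟨n, hn, j', by simpa using hp⟩

-- ===== VERDICT (by name: the statement is the Claim_ definition above) =====
theorem is_fatal_auth_or_quota_py_spec : Claim_equal_is_fatal_auth_or_quota_py := by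
  intro msg _
  unfold Spec_is_fatal_auth_or_quota_py is_fatal_auth_or_quota_py is_fatal_auth_or_quota_py_alt
  apply Bool.eq_iff_iff.mpr
  rw [List.any_eq_true, pvScanB_iff]
  constructor
  · rintro ⟨n, hn, h⟩
    refine ⟨n, hn, ?_⟩
    have := (PySem.Str.isIn_iff_infix _ _).mp h
    rw [PySem.Str.toList_lower] at this
    exact (PySem.Chars.exists_prefix_drop_iff_isIn _ _).mpr
      ((PySem.Chars.isIn_iff_infix _ _).mpr this) |>.imp (fun j hj => hj)
  · rintro ⟨n, hn, j, hp⟩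
    refine ⟨n, hn, ?_⟩
    rw [PySem.Str.isIn_eq, PySem.Str.toList_lower]
    exact (PySem.Chars.exists_prefix_drop_iff_isIn _ _).mp ⟨j, hp⟩
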